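-- pv_equiv track=rewrite | github.com/andriitugai/Code_Challenges | remove-palindrome-subsequences/solution.py | removePalindromeSub
-- ===== SOURCE A (Python) =====
-- def removePalindromeSub(s: str) -> int:
--     if len(s) == 0:
--         return 0
--
--     left, right = 0, len(s) - 1
--
--     while left < right:
--         if s[left] == s[right]:
--             left += 1
--             right -= 1
--         else:
--             return 2
--
--     return 1
-- ===== SOURCE B (Python) =====
-- def removePalindromeSub(s: str) -> int:
--     if len(s) == 0:
--         return 0
--     return 1 if s == s[::-1] else 2
-- ===== Notes on version B (the rewrite author's own statement) =====
-- stated objective: idiomatic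
-- what changed: Replaces the two-pointer inward scan with early exit by building the reversed string once and doing a single whole-string equality comparison.
import Mathlib
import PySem

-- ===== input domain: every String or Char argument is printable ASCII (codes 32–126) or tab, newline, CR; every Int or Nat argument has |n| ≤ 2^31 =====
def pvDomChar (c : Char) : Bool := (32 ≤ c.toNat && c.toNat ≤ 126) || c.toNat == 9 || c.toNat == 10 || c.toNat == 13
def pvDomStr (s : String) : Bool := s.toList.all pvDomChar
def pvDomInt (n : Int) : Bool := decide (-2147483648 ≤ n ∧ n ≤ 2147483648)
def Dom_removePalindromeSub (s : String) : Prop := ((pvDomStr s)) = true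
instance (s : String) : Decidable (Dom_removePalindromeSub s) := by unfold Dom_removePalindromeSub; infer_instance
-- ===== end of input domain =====

-- B replaces A's two-pointer inward scan by a reverse-and-compare (idiomatic, same cost).

-- ===== PORT A =====
-- the while-loop: left/right move inward while the end characters match
def removePalindromeSubLoop (l : List Char) (left right : Nat) : Int :=
  if _h : left < right then
    if l[left]? = l[right]? then removePalindromeSubLoop l (left + 1) (right - 1)
    else 2
  else 1
termination_by right - left
decreasing_by omega

def removePalindromeSub (s : String) : Int :=
  let l := s.toList
  if l.length = 0 then 0
  else removePalindromeSubLoop l 0 (l.length - 1)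

-- ===== PORT B =====
def removePalindromeSub_alt (s : String) : Int :=
  let l := s.toList
  if l.length = 0 then 0
  else if l = l.reverse then 1 else 2

-- ===== PRECONDITION & SPEC =====
def Spec_removePalindromeSub (s : String) (out : Int) : Prop := out = removePalindromeSub_alt s
instance (s : String) (out : Int) : Decidable (Spec_removePalindromeSub s out) := by unfold Spec_removePalindromeSub; infer_instance

-- ===== CLAIM (what is proved, stated in full; the proofs are below) =====
def Claim_equal_removePalindromeSub : Prop := ∀ (s : String), Dom_removePalindromeSub s → Spec_removePalindromeSub s (removePalindromeSub s)

-- ===== LEMMAS AND PROOFS =====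

theorem loop_one (l : List Char) (left right : Nat)
    (h : ∀ k, left ≤ k → k ≤ right → l[k]? = l[left + right - k]?) :
    removePalindromeSubLoop l left right = 1 := by
  unfold removePalindromeSubLoop
  split
  · rename_i hlt
    rw [if_pos]
    · exact loop_one l (left + 1) (right - 1) (by
        intro k hk1 hk2
        have := h k (by omega) (by omega)
        have : l[k]? = l[left + right - k]? := this
        have heq : left + 1 + (right - 1) - k = left + right - k := by omega
        rw [heq]; exact this)
    · have := h left (le_refl _) (by omega)
      simpa using this
  · rfl
termination_by right - left
decreasing_by omega

theorem loop_two (l : List Char) (left right : Nat)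
    (h : ¬ ∀ k, left ≤ k → k ≤ right → l[k]? = l[left + right - k]?) :
    removePalindromeSubLoop l left right = 2 := by
  unfold removePalindromeSubLoop
  split
  · rename_i hlt
    by_cases he : l[left]? = l[right]?
    · rw [if_pos (by simpa using he)]
      exact loop_two l (left + 1) (right - 1) (by
        intro hc
        apply h
        intro k hk1 hk2
        by_cases hkl : k = left
        · subst hkl; simpa using he
        · by_cases hkr : k = right
          · subst hkr
            have hx : left + k - k = left := by omega
            rw [hx]; exact he.symm
          · have := hc k (by omega) (by omega)
            have heq : left + 1 + (right - 1) - k = left + right - k := by omega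
            rw [heq] at this; exact this)
    · rw [if_neg (by simpa using he)]
  · exfalso
    apply h
    intro k hk1 hk2
    have hk : k = left := by omega
    have hk' : left + right - k = k := by omega
    rw [hk']
termination_by right - left
decreasing_by omega

theorem pal_iff (l : List Char) (hne : l.length ≠ 0) :
    (l = l.reverse) ↔ ∀ k, 0 ≤ k → k ≤ l.length - 1 → l[k]? = l[0 + (l.length - 1) - k]? := by
  constructor
  · intro hp k _ hk2
    have hkn : k < l.length := by omega
    conv_lhs => rw [hp]
    rw [List.getElem?_reverse hkn]
    congr 1
    omega
  · intro hc
    apply List.ext_getElem?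
    intro i
    by_cases hi : i < l.length
    · rw [List.getElem?_reverse hi]
      have := hc (l.length - 1 - i) (by omega) (by omega)
      have heq : 0 + (l.length - 1) - (l.length - 1 - i) = i := by omega
      rw [heq] at this
      exact this.symm
    · rw [List.getElem?_eq_none (by omega), List.getElem?_eq_none (by simp; omega)]

-- ===== VERDICT (by name: the statement is the Claim_ definition above) =====
theorem removePalindromeSub_spec : Claim_equal_removePalindromeSub := by
  intro s _
  unfold Spec_removePalindromeSub removePalindromeSub removePalindromeSub_alt
  simp only []
  by_cases h0 : s.toList.length = 0
  · simp [h0]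
  · rw [if_neg h0, if_neg h0]
    by_cases hp : s.toList = s.toList.reverse
    · rw [if_pos hp]
      exact loop_one _ _ _ ((pal_iff _ h0).mp hp)
    · rw [if_neg hp]
      exact loop_two _ _ _ (fun hc => hp ((pal_iff _ h0).mpr hc))
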